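-- pv_equiv track=rewrite | github.com/eyorata/document-refinery | scripts/build_qa_examples_from_history.py | _class_from_document_name
-- ===== SOURCE A (Python) =====
-- def _class_from_document_name(name: str, fallback: str) -> str:
--     low = (name or "").lower()
--     if any(k in low for k in ["audit report", "assigned-regular-budget", "scanned"]):
--         return "B"
--     if any(k in low for k in ["tax_expenditure", "tax expenditure", "import tax"]):
--         return "D"
--     if any(k in low for k in ["annual report", "cbe", "financial report", "interim_trpw3"]):
--         return "A"
--     if any(k in low for k in ["trpw3_delivery", "technical", "performance_survey"]):
--         return "C"
--     return fallback
-- ===== SOURCE B (Python) =====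
-- # B: exhaustive keyword->class matching followed by priority selection,
-- # instead of A's sequential short-circuit if-chains.
-- _KEYWORD_CLASS = {
--     "audit report": "B", "assigned-regular-budget": "B", "scanned": "B",
--     "tax_expenditure": "D", "tax expenditure": "D", "import tax": "D",
--     "annual report": "A", "cbe": "A", "financial report": "A", "interim_trpw3": "A",
--     "trpw3_delivery": "C", "technical": "C", "performance_survey": "C",
-- }
-- _PRIORITY = "BDAC"
--
-- def _class_from_document_name(name: str, fallback: str) -> str:
--     low = (name or "").lower()
--     matched = {cls for k, cls in _KEYWORD_CLASS.items() if k in low}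
--     for cls in _PRIORITY:
--         if cls in matched:
--             return cls
--     return fallback
-- ===== Notes on version B (the rewrite author's own statement) =====
-- stated objective: alternative
-- what changed: Instead of four sequential short-circuit if/any chains, B inverts the rules into one keyword-to-class map, exhaustively computes the SET of all classes whose keyword occurs, and then selects the highest-priority class from the fixed order 'BDAC'.
import Mathlib
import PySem

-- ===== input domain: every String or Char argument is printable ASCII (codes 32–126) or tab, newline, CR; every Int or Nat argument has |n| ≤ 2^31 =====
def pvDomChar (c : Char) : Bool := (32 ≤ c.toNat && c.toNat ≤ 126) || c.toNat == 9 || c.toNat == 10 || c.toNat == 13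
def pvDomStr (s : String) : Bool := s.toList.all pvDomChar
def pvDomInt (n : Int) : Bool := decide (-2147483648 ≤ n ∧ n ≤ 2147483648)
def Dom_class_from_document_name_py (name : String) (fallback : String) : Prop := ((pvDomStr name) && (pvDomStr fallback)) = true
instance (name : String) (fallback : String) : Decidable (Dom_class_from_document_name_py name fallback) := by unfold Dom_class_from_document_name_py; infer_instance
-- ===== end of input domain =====

-- B inverts the rules into a keyword->class map, computes the set of all matching classes, then picks by fixed priority "BDAC" (alternative decomposition; same cost).


-- ===== PORT A =====
-- Literal port: 'name or ""' on a str yields name itself when nonempty and "" otherwise.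
def class_from_document_name_py (name : String) (fallback : String) : String :=
  let low := PySem.Str.lower (if name = "" then "" else name)
  if [ "audit report", "assigned-regular-budget", "scanned" ].any (fun k => PySem.Str.isIn k low) then "B"
  else if [ "tax_expenditure", "tax expenditure", "import tax" ].any (fun k => PySem.Str.isIn k low) then "D"
  else if [ "annual report", "cbe", "financial report", "interim_trpw3" ].any (fun k => PySem.Str.isIn k low) then "A"
  else if [ "trpw3_delivery", "technical", "performance_survey" ].any (fun k => PySem.Str.isIn k low) then "C"
  else fallback

-- ===== PORT B =====
def pvKeywordClass : List (String × String) :=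
  [ ("audit report", "B"), ("assigned-regular-budget", "B"), ("scanned", "B"),
    ("tax_expenditure", "D"), ("tax expenditure", "D"), ("import tax", "D"),
    ("annual report", "A"), ("cbe", "A"), ("financial report", "A"), ("interim_trpw3", "A"),
    ("trpw3_delivery", "C"), ("technical", "C"), ("performance_survey", "C") ]

-- the set comprehension {cls for k, cls in _KEYWORD_CLASS.items() if k in low}
def pvMatched (low : String) : List String :=
  PySem.Set.ofList ((pvKeywordClass.filter (fun p => PySem.Str.isIn p.1 low)).map Prod.snd)

-- the priority-selection loop over "BDAC"
def pvPick (prio : List String) (matched : List String) (fallback : String) : String :=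
  match prio with
  | [] => fallback
  | c :: rest => if c ∈ matched then c else pvPick rest matched fallback

def class_from_document_name_py_alt (name : String) (fallback : String) : String :=
  let low := PySem.Str.lower (if name = "" then "" else name)
  pvPick ["B", "D", "A", "C"] (pvMatched low) fallback

-- ===== PRECONDITION & SPEC =====
def Spec_class_from_document_name_py (name : String) (fallback : String) (out : String) : Prop := out = class_from_document_name_py_alt name fallback
instance (name : String) (fallback : String) (out : String) : Decidable (Spec_class_from_document_name_py name fallback out) := by unfold Spec_class_from_document_name_py; infer_instance

-- ===== CLAIM =====
def Claim_equal_class_from_document_name_py : Prop := ∀ (name : String) (fallback : String), Dom_class_from_document_name_py name fallback → Spec_class_from_document_name_py name fallback (class_from_document_name_py name fallback)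

-- ===== LEMMAS AND PROOFS =====
theorem mem_matched (low c : String) :
    (c ∈ pvMatched low) ↔ ∃ p ∈ pvKeywordClass, PySem.Str.isIn p.1 low = true ∧ p.2 = c := by
  simp [pvMatched, PySem.Set.mem_ofList, List.mem_filter, List.mem_map]

theorem mem_B (low : String) : ("B" ∈ pvMatched low) ↔
    (PySem.Str.isIn "audit report" low || PySem.Str.isIn "assigned-regular-budget" low || PySem.Str.isIn "scanned" low) = true := by
  simp [mem_matched, pvKeywordClass]
  tauto

theorem mem_D (low : String) : ("D" ∈ pvMatched low) ↔
    (PySem.Str.isIn "tax_expenditure" low || PySem.Str.isIn "tax expenditure" low || PySem.Str.isIn "import tax" low) = true := by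
  simp [mem_matched, pvKeywordClass]
  tauto

theorem mem_A (low : String) : ("A" ∈ pvMatched low) ↔
    (PySem.Str.isIn "annual report" low || PySem.Str.isIn "cbe" low || PySem.Str.isIn "financial report" low || PySem.Str.isIn "interim_trpw3" low) = true := by
  simp [mem_matched, pvKeywordClass]
  tauto

theorem mem_C (low : String) : ("C" ∈ pvMatched low) ↔
    (PySem.Str.isIn "trpw3_delivery" low || PySem.Str.isIn "technical" low || PySem.Str.isIn "performance_survey" low) = true := by
  simp [mem_matched, pvKeywordClass]
  tauto

-- ===== VERDICT =====
theorem class_from_document_name_py_spec : Claim_equal_class_from_document_name_py := by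
  intro name fallback _
  unfold Spec_class_from_document_name_py class_from_document_name_py class_from_document_name_py_alt
  simp only [pvPick, List.any_cons, List.any_nil, Bool.or_false]
  simp only [mem_B, mem_D, mem_A, mem_C]
  split_ifs <;> simp_all
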